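-- pv_equiv track=rewrite | github.com/pemacy/Launch_School | Coursework/Python/Py110/lesson_1/sum_row.py | sum_rows
-- ===== SOURCE A (Python) =====
-- def sum_rows(user_row):
--     rows_dict = {}
--     row = 1
--     start = 2
--     while row <= user_row:
--         end = start + (2 * row)
--         row_list = list(range(start, end, 2))
--         rows_dict[row] = row_list
--         row += 1
--         start = end
--     return sum(rows_dict[user_row])
-- ===== SOURCE B (Python) =====
-- def sum_rows(user_row):
--     # Closed form: row r holds the r even numbers starting at r*(r-1)+2,
--     # whose sum is r**3 + r.
--     return user_row ** 3 + user_row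
-- ===== Notes on version B (the rewrite author's own statement) =====
-- stated objective: faster
-- what changed: Replaces the loop that builds every row's list in a dict with the closed-form sum r**3 + r of the user_row-th row.
import Mathlib
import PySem

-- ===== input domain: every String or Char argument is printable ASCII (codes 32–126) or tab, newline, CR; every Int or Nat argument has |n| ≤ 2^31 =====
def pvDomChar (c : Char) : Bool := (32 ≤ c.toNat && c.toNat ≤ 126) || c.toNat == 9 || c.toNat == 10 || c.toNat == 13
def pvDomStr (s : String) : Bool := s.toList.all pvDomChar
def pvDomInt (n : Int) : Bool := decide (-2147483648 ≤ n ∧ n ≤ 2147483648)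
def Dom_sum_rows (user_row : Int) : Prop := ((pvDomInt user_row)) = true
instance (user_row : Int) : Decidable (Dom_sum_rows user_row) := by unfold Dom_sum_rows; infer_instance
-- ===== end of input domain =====

-- B replaces A's dict-building loop by the closed-form row sum r^3 + r (O(1) vs O(r^2)).
-- ===== PORT A =====
-- the while loop: carries (row, start, rows_dict); terminates since user_row - row shrinks
def sumRowsLoop (user_row row start : Int) (d : PySem.Dict Int (List Int)) :
    PySem.Dict Int (List Int) :=
  if _h : row ≤ user_row then
    let end_ := start + 2 * row
    let row_list := PySem.List.pyRange start end_ 2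
    sumRowsLoop user_row (row + 1) end_ (d.insert row row_list)
  else d
termination_by (user_row + 1 - row).toNat
decreasing_by omega

def sum_rows (user_row : Int) : Int :=
  -- rows_dict[user_row]: under Pre_ the key is present; default [] stands for the KeyError case
  ((sumRowsLoop user_row 1 2 PySem.Dict.empty).getD user_row []).sum

-- ===== PORT B =====
def sum_rows_alt (user_row : Int) : Int := user_row ^ 3 + user_row

-- ===== PRECONDITION & SPEC =====
-- Pre_ excludes non-positive rows, on which A raises KeyError (the dict stays empty).
def Pre_sum_rows (user_row : Int) : Prop := 1 ≤ user_row
instance (user_row : Int) : Decidable (Pre_sum_rows user_row) := by unfold Pre_sum_rows; infer_instance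
def pvWitness_sum_rows : Int := 3

def Spec_sum_rows (user_row : Int) (out : Int) : Prop := out = sum_rows_alt user_row
instance (user_row : Int) (out : Int) : Decidable (Spec_sum_rows user_row out) := by unfold Spec_sum_rows; infer_instance

-- ===== CLAIM (what is proved, stated in full; the proofs are below) =====
def Claim_equal_sum_rows : Prop := ∀ (user_row : Int), Dom_sum_rows user_row → Pre_sum_rows user_row → Spec_sum_rows user_row (sum_rows user_row)

-- ===== LEMMAS AND PROOFS =====

-- The final dict maps user_row to the range starting where the accumulated start lands.
theorem sumRowsLoop_getD (user_row : Int) :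
    ∀ (n : Nat) (row start : Int) (d : PySem.Dict Int (List Int)),
      (user_row - row).toNat = n →
      1 ≤ row → row ≤ user_row →
      start = row * (row - 1) + 2 →
      (sumRowsLoop user_row row start d).getD user_row [] =
        PySem.List.pyRange (user_row * (user_row - 1) + 2)
          (user_row * (user_row - 1) + 2 + 2 * user_row) 2 := by
  intro n
  induction n with
  | zero =>
    intro row start d hn h1 h2 hs
    have heq : row = user_row := by omega
    rw [sumRowsLoop]
    rw [dif_pos h2, sumRowsLoop, dif_neg (by omega)]
    rw [PySem.Dict.getD_insert]
    rw [if_pos heq.symm]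
    subst heq hs
    ring_nf
  | succ m ih =>
    intro row start d hn h1 h2 hs
    have hlt : row < user_row := by omega
    rw [sumRowsLoop, dif_pos h2]
    exact ih (row + 1) (start + 2 * row) _ (by omega) (by omega) (by omega)
      (by rw [hs]; ring)

theorem sum_range_map_two (a : Int) (n : Nat) :
    (List.map (fun k : Nat => a + 2 * (k : Int)) (List.range n)).sum = n * a + n * (n - 1) := by
  induction n with
  | zero => simp
  | succ m ih =>
    rw [List.range_succ, List.map_append, List.sum_append, ih]
    simp
    ring

theorem sum_pyRange_two (a : Int) (r : Nat) :
    (PySem.List.pyRange a (a + 2 * r) 2).sum = r * a + r * (r - 1) := by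
  rw [PySem.List.pyRange_of_pos _ _ (by norm_num)]
  rcases Nat.eq_zero_or_pos r with h | h
  · subst h; simp
  · rw [if_pos (by omega)]
    have : ((a + 2 * (r : Int) - a + 2 - 1) / 2).toNat = r := by omega
    rw [this, sum_range_map_two]

-- ===== VERDICT (by name: the statement is the Claim_ definition above) =====
theorem sum_rows_spec : Claim_equal_sum_rows := by
  intro u _ hpre
  unfold Spec_sum_rows sum_rows sum_rows_alt
  have h1 : (1 : Int) ≤ u := hpre
  rw [sumRowsLoop_getD u (u - 1).toNat 1 2 _ (by omega) (by omega) h1 (by ring)]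
  have hu : u = ((u.toNat : Int)) := by omega
  rw [hu, sum_pyRange_two]
  ring
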